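-- pv_equiv track=rewrite | github.com/COMP115-Bravo/comp115 | Mar14_in_class_practice/week8_file_exercises.py | bus_max_id
-- ===== SOURCE A (Python) =====
-- def bus_max_id(ids):
--     dict = {}
--     for id in ids:
--         dict[id] = dict.get(id, 0) + 1
--
--     #max_value = max(dict.values())
--     max_value = 0
--     for id in dict:
--         if dict[id] > max_value:
--             max_value = dict[id]
--
--     res = []
--     for id in dict:
--         if dict[id] == max_value:
--             res.append(id)
--     return res
-- ===== SOURCE B (Python) =====
-- def bus_max_id(ids):
--     best = max(map(ids.count, ids), default=0)
--     res = []
--     for id in ids: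
--         if ids.count(id) == best and id not in res:
--             res.append(id)
--     return res
-- ===== Notes on version B (the rewrite author's own statement) =====
-- stated objective: simpler
-- what changed: B drops A's counting dict entirely: it takes the maximum of list.count over the elements and then makes one dedup-while-filter pass over the raw list, appending each first occurrence whose count equals that maximum.
import Mathlib
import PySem

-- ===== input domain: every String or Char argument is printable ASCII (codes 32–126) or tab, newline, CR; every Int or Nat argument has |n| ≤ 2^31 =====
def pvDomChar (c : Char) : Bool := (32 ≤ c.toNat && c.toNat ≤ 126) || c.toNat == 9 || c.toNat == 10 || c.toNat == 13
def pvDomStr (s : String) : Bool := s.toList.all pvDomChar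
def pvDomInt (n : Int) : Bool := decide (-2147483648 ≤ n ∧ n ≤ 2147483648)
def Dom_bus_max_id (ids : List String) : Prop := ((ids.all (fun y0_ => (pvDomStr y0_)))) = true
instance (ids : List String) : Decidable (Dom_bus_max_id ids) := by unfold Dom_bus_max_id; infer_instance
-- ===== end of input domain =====

-- B drops A's counting dict: it takes the maximum of list.count over the elements and
-- makes one dedup-while-filter pass over the raw list (simpler decomposition, not faster).

-- ===== PORT A =====
def bus_max_id (ids : List String) : List String :=
  let dict := ids.foldl (fun d id => d.insert id (d.getD id 0 + 1)) (PySem.Dict.empty : PySem.Dict String Int)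
  let max_value := dict.keys.foldl (fun m id => if dict.getD id 0 > m then dict.getD id 0 else m) (0 : Int)
  dict.keys.foldl (fun res id => if dict.getD id 0 == max_value then res ++ [id] else res) []

-- ===== PORT B =====
def bus_max_id_alt (ids : List String) : List String :=
  let best : Int := PySem.List.maxD (ids.map (fun x => (PySem.List.count ids x : Int))) (fun k => k) 0
  ids.foldl (fun res id =>
    if ((PySem.List.count ids id : Int) == best) && !(res.contains id) then res ++ [id] else res) []

-- ===== PRECONDITION & SPEC =====
def Spec_bus_max_id (ids : List String) (out : List String) : Prop := out = bus_max_id_alt ids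
instance (ids : List String) (out : List String) : Decidable (Spec_bus_max_id ids out) := by unfold Spec_bus_max_id; infer_instance

-- ===== CLAIM (what is proved, stated in full; the proofs are below) =====
def Claim_equal_bus_max_id : Prop := ∀ (ids : List String), Dom_bus_max_id ids → Spec_bus_max_id ids (bus_max_id ids)

-- ===== LEMMAS AND PROOFS =====

lemma pv_ite_gt_eq_max (a b : Int) : (if b > a then b else a) = max a b := by
  rcases le_total a b with h | h
  · rcases eq_or_lt_of_le h with h' | h'
    · simp [h'.symm]
    · simp [h', max_eq_right h]
  · simp [not_lt_of_ge h, max_eq_left h]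

-- B's dedup-while-filter pass, as a filter of the running Set.add fold
lemma pv_fold_dedup_filter (p : String → Bool) (xs s : List String) :
    xs.foldl (fun res x => if p x && !(res.contains x) then res ++ [x] else res) (s.filter p)
      = (xs.foldl PySem.Set.add s).filter p := by
  induction xs generalizing s with
  | nil => rfl
  | cons x t ih =>
    simp only [List.foldl_cons]
    have hstep : (if p x && !((s.filter p).contains x) then s.filter p ++ [x] else s.filter p)
        = (PySem.Set.add s x).filter p := by
      by_cases hp : p x = true
      · by_cases hs : x ∈ s
        · have h2 : PySem.Set.add s x = s := by simp [PySem.Set.add, hs]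
          simp [hp, hs]
        · simp [hp, hs, PySem.Set.add, List.filter_append]
      · have hp' : p x = false := by simpa using hp
        by_cases hs : x ∈ s
        · have h2 : PySem.Set.add s x = s := by simp [PySem.Set.add, hs]
          simp [hp', h2]
        · have h2 : PySem.Set.add s x = s ++ [x] := by simp [PySem.Set.add, hs]
          simp [hp', h2, List.filter_append]
    rw [hstep, ih]

-- ===== VERDICT (by name: the statement is the Claim_ definition above) =====
theorem bus_max_id_spec : Claim_equal_bus_max_id := by
  intro ids _
  unfold Spec_bus_max_id bus_max_id bus_max_id_alt
  rw [PySem.Dict.foldl_insert_getD_add_one_eq_counter]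
  simp only [PySem.Dict.keys_counter, PySem.Dict.getD_counter, PySem.List.count_eq]
  set K : List String := PySem.Set.ofList ids with hK
  set c : String → Int := fun k => ((ids.count k : Nat) : Int) with hc
  -- A's max loop is a fold of `max` over the counts
  have hmaxA : (K.foldl (fun m id => if c id > m then c id else m) (0 : Int))
      = (K.map c).foldl max 0 := by
    rw [List.foldl_map]
    congr 1
    funext m k
    exact pv_ite_gt_eq_max m (c k)
  set M : Int := (K.map c).foldl max 0 with hM
  -- A's result loop is a filter
  rw [PySem.List.foldl_append_if (fun id => c id == (K.foldl (fun m id => if c id > m then c id else m) 0)) (fun id => id) K []]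
  rw [hmaxA]
  simp only [List.nil_append, List.map_id']
  -- best = M (both are the maximum occurrence count; 0 when ids = [])
  have hbestM : PySem.List.maxD (List.map (fun x => ((List.count x ids : Nat) : Int)) ids) (fun k => k) 0 = M := by
    by_cases hnil : ids = []
    · subst hnil
      simp [hM, hK, PySem.List.maxD, PySem.List.max?]
    · have hne : ids ≠ [] := hnil
      have hmapne : ids.map c ≠ [] := by simp [hne]
      obtain ⟨m, hm⟩ : ∃ m, PySem.List.max? (ids.map c) (fun k => k) = some m := by
        cases h : PySem.List.max? (ids.map c) (fun k => k) with
        | none => exact absurd ((PySem.List.max?_eq_none_iff _ _).mp h) hmapne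
        | some m => exact ⟨m, rfl⟩
      have hmM : m ≤ M := by
        obtain ⟨x, hx, rfl⟩ := List.mem_map.mp (PySem.List.max?_mem hm)
        have hxK : x ∈ K := (PySem.Set.mem_ofList ids x).mpr hx
        exact (PySem.List.le_foldl_max (K.map c) 0).2 _ (List.mem_map_of_mem hxK)
      have hMm : M ≤ m := by
        rcases PySem.List.foldl_max_mem (K.map c) 0 with h0 | hmem
        · obtain ⟨x, hx, rfl⟩ := List.mem_map.mp (PySem.List.max?_mem hm)
          have h1 : 1 ≤ ids.count x := List.count_pos_iff.mpr hx
          rw [← hM] at h0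
          rw [h0]
          simp only [hc]
          exact_mod_cast Nat.le_trans (Nat.zero_le 1) h1
        · obtain ⟨k, hk, hck⟩ := List.mem_map.mp hmem
          have hkids : k ∈ ids := (PySem.Set.mem_ofList ids k).mp hk
          have := PySem.List.max?_isMax hm (c k) (List.mem_map_of_mem hkids)
          rw [hM, ← hck]
          exact this
      show PySem.List.maxD (List.map c ids) (fun k => k) 0 = M
      rw [PySem.List.maxD, hm]
      simp only [Option.getD_some]
      omega
  set p : String → Bool := fun x =>
    (((List.count x ids : Nat) : Int)
      == PySem.List.maxD (List.map (fun x => ((List.count x ids : Nat) : Int)) ids) (fun k => k) 0) with hp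
  have hpredeq : (fun id => c id == M) = p := by
    funext k
    rw [hp]
    simp only [hbestM, hc]
  calc K.filter (fun id => c id == M)
      = K.filter p := by rw [hpredeq]
    _ = (ids.foldl PySem.Set.add []).filter p := by rw [← PySem.Set.ofList_eq_foldl]
    _ = ids.foldl (fun res x => if p x && !(res.contains x) then res ++ [x] else res) [] :=
        (pv_fold_dedup_filter p ids []).symm
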